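-- pv_equiv track=rewrite | github.com/Tony-sama/pylfit | tests/examples/sequences_learning/sequence_properties.py | alt_precedence
-- ===== SOURCE A (Python) =====
-- def alt_precedence(events, sequence):
--     features = []
--     values = []
--     for ei in sorted(events):
--         for ej in sorted(events):
--             if(ei == ej):
--                 continue
--             features.append("alt_precedence_"+str(ei)+"_"+str(ej))
--             value = True
--             expect_ei = False
--             for e in reversed(sequence):
--                 if(expect_ei and e == ej):
--                     value = False
--                     break
--
--                 if(e == ej):
--                     expect_ei = True
--                     continue
--
--                 if(e == ei):
--                     expect_ei = False
--
--             if(expect_ei):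
--                 value = False
--
--             values.append(value)
--     return features, values
-- ===== SOURCE B (Python) =====
-- def _alternates(a, b):
--     # a, b: strictly increasing position lists of ei and ej; True iff every
--     # b-position is preceded by an a-position since the previous b-position.
--     seen = False
--     x, y = 0, 0
--     while x < len(a) or y < len(b):
--         if y == len(b) or (x < len(a) and a[x] < b[y]):
--             seen = True
--             x += 1
--         else:
--             if not seen:
--                 return False
--             seen = False
--             y += 1
--     return True
--
--
-- def alt_precedence(events, sequence):
--     evs = sorted(events)
--     occ = {e: [i for i, x in enumerate(sequence) if x == e] for e in evs}
--     features = []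
--     values = []
--     for ei in evs:
--         for ej in evs:
--             if ei == ej:
--                 continue
--             features.append("alt_precedence_" + str(ei) + "_" + str(ej))
--             values.append(_alternates(occ[ei], occ[ej]))
--     return features, values
-- ===== Notes on version B (the rewrite author's own statement) =====
-- stated objective: faster
-- what changed: Instead of rescanning the whole sequence backwards for every ordered event pair, B precomputes each event's occurrence-index list once and, per pair, merges just the two index lists with a forward two-pointer scan.
import Mathlib
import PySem

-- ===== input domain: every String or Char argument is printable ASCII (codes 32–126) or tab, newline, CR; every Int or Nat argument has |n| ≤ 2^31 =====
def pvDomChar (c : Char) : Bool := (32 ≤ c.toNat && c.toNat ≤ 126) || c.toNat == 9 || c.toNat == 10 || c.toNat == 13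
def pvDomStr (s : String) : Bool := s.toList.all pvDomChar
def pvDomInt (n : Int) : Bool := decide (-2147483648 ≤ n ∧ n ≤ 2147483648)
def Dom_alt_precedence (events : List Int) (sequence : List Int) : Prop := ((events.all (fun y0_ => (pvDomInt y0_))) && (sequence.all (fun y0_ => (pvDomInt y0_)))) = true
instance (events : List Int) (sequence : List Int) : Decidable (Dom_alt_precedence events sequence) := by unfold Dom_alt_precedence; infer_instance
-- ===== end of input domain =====

-- B replaces A's per-pair full rescan of the sequence by precomputed occurrence-index
-- lists per event, merged forward per pair (objective: faster, asymptotic).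

-- ===== PORT A =====
-- inner `for e in reversed(sequence)` loop: state (value, expect_ei); break returns early
def pvLoopA (ei ej : Int) : List Int → Bool → Bool × Bool
  | [], expect => (true, expect)
  | e :: rest, expect =>
    if expect = true ∧ e = ej then (false, expect)
    else if e = ej then pvLoopA ei ej rest true
    else if e = ei then pvLoopA ei ej rest false
    else pvLoopA ei ej rest expect

def pvInnerA (ei ej : Int) (sequence : List Int) : Bool :=
  let r := pvLoopA ei ej sequence.reverse false
  if r.2 then false else r.1

def alt_precedence (events : List Int) (sequence : List Int) : List String × List Bool :=
  let sortedE := PySem.List.sorted events (fun x => x) false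
  sortedE.foldl (fun acc ei =>
    sortedE.foldl (fun acc2 ej =>
      if ei == ej then acc2
      else (acc2.1 ++ ["alt_precedence_" ++ PySem.Int.toStr ei ++ "_" ++ PySem.Int.toStr ej],
            acc2.2 ++ [pvInnerA ei ej sequence])) acc) ([], [])

-- ===== PORT B =====
-- [i for i, x in enumerate(sequence) if x == e]
def pvIdxs (e : Int) (sequence : List Int) : List Int :=
  (PySem.List.enumerate sequence 0).filterMap (fun p => if p.2 = e then some p.1 else none)

-- the `while x < len(a) or y < len(b)` two-pointer loop of _alternates, as suffix recursion
def pvMerge (seen : Bool) : List Int → List Int → Bool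
  | [], [] => true
  | _ :: a, [] => pvMerge true a []
  | [], _ :: b => if seen then pvMerge false [] b else false
  | p :: a, q :: b =>
    if p < q then pvMerge true a (q :: b)
    else if seen then pvMerge false (p :: a) b else false
termination_by a b => a.length + b.length

-- occ = {e: [...] for e in evs}
def pvOcc (evs : List Int) (sequence : List Int) : PySem.Dict Int (List Int) :=
  evs.foldl (fun d e => d.insert e (pvIdxs e sequence)) PySem.Dict.empty

def alt_precedence_alt (events : List Int) (sequence : List Int) : List String × List Bool :=
  let evs := PySem.List.sorted events (fun x => x) false
  let occ := pvOcc evs sequence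
  evs.foldl (fun acc ei =>
    evs.foldl (fun acc2 ej =>
      if ei == ej then acc2
      else (acc2.1 ++ ["alt_precedence_" ++ PySem.Int.toStr ei ++ "_" ++ PySem.Int.toStr ej],
            acc2.2 ++ [pvMerge false (occ.getD ei []) (occ.getD ej [])])) acc) ([], [])

-- ===== PRECONDITION & SPEC =====
def Spec_alt_precedence (events : List Int) (sequence : List Int) (out : List String × List Bool) : Prop := out = alt_precedence_alt events sequence
instance (events : List Int) (sequence : List Int) (out : List String × List Bool) : Decidable (Spec_alt_precedence events sequence out) := by unfold Spec_alt_precedence; infer_instance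

-- ===== CLAIM (what is proved, stated in full; the proofs are below) =====
def Claim_equal_alt_precedence : Prop := ∀ (events : List Int) (sequence : List Int), Dom_alt_precedence events sequence → Spec_alt_precedence events sequence (alt_precedence events sequence)

-- ===== LEMMAS AND PROOFS =====

-- classification of a sequence element for the pair (ei, ej): ej ↦ true, ei ↦ false, other ↦ dropped
def pvClassify (ei ej : Int) (e : Int) : Option Bool :=
  if e = ej then some true else if e = ei then some false else none

-- A's backward scan, on the classified (Bool) list
def pvBwd : Bool → List Bool → Bool × Bool
  | expect, [] => (true, expect)
  | expect, b :: r =>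
    if expect = true ∧ b = true then (false, expect)
    else if b then pvBwd true r
    else pvBwd false r

-- B's forward scan, on the classified (Bool) list
def pvFwd : Bool → List Bool → Bool
  | _, [] => true
  | seen, b :: r => if b then (if seen then pvFwd false r else false) else pvFwd true r

theorem pvLoopA_eq_bwd (ei ej : Int) (hne : ei ≠ ej) (l : List Int) (exp : Bool) :
    pvLoopA ei ej l exp = pvBwd exp (l.filterMap (pvClassify ei ej)) := by
  induction l generalizing exp with
  | nil => rfl
  | cons e rest ih =>
    by_cases hj : e = ej
    · subst hj
      cases exp <;> simp [pvLoopA, pvBwd, pvClassify, ih]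
    · by_cases hi : e = ei
      · subst hi
        simp [pvLoopA, pvBwd, pvClassify, hne, ih]
      · simp [pvLoopA, pvClassify, hj, hi, ih]

theorem pvBwd_append (m n : List Bool) (exp : Bool) :
    pvBwd exp (m ++ n) = if (pvBwd exp m).1 then pvBwd (pvBwd exp m).2 n else pvBwd exp m := by
  induction m generalizing exp with
  | nil => simp [pvBwd]
  | cons b r ih =>
    cases b <;> cases exp <;> simp [pvBwd, ih]

theorem pvFwd_false_eq (u : List Bool) :
    pvFwd false u = (pvFwd true u && !(u.head?.getD false)) := by
  cases u with
  | nil => rfl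
  | cons c v => cases c <;> simp [pvFwd]

theorem pvBwd_reverse (t : List Bool) :
    pvBwd false t.reverse = if pvFwd true t then (true, t.head?.getD false) else (false, true) := by
  induction t with
  | nil => rfl
  | cons b u ih =>
    rw [List.reverse_cons, pvBwd_append, ih]
    by_cases h : pvFwd true u = true
    · cases b
      · simp [h, pvFwd, pvBwd]
      · have := pvFwd_false_eq u
        by_cases he : u.head?.getD false = true
        · simp [h, he, pvFwd, pvBwd, this]
        · simp only [Bool.not_eq_true] at he
          simp [h, he, pvFwd, pvBwd, this]
    · simp only [Bool.not_eq_true] at h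
      cases b
      · simp [h, pvFwd]
      · simp [h, pvFwd, pvFwd_false_eq u]

theorem pvInnerA_eq_fwd (ei ej : Int) (hne : ei ≠ ej) (s : List Int) :
    pvInnerA ei ej s = pvFwd false (s.filterMap (pvClassify ei ej)) := by
  simp only [pvInnerA, pvLoopA_eq_bwd ei ej hne, List.filterMap_reverse, pvBwd_reverse]
  rw [pvFwd_false_eq]
  by_cases h : pvFwd true (s.filterMap (pvClassify ei ej)) = true
  · by_cases he : (s.filterMap (pvClassify ei ej)).head?.getD false = true
    · simp [h]
    · simp only [Bool.not_eq_true] at he; simp [h]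
  · simp only [Bool.not_eq_true] at h; simp [h]

-- B's two-pointer merge over the two index lists = forward scan over the classified list
theorem pvMerge_eq_fwd (ei ej : Int) (hne : ei ≠ ej) (ps : List (Int × Int))
    (hp : ps.Pairwise (fun p q => p.1 < q.1)) (seen : Bool) :
    pvMerge seen (ps.filterMap (fun p => if p.2 = ei then some p.1 else none))
                 (ps.filterMap (fun p => if p.2 = ej then some p.1 else none))
      = pvFwd seen (ps.filterMap (fun p => pvClassify ei ej p.2)) := by
  induction ps generalizing seen with
  | nil => simp [pvMerge, pvFwd]
  | cons p rest ih =>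
    obtain ⟨k, v⟩ := p
    rw [List.pairwise_cons] at hp
    obtain ⟨hlt, hrest⟩ := hp
    have hA : ∀ x ∈ rest.filterMap (fun p => if p.2 = ei then some p.1 else none), k < x := by
      intro x hx
      rw [List.mem_filterMap] at hx
      obtain ⟨q, hq, hq2⟩ := hx
      have := hlt q hq
      split at hq2
      · cases hq2; exact this
      · cases hq2
    have hB : ∀ x ∈ rest.filterMap (fun p => if p.2 = ej then some p.1 else none), k < x := by
      intro x hx
      rw [List.mem_filterMap] at hx
      obtain ⟨q, hq, hq2⟩ := hx
      have := hlt q hq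
      split at hq2
      · cases hq2; exact this
      · cases hq2
    by_cases hj : v = ej
    · have hvi : ¬ v = ei := fun h => hne (h ▸ hj)
      simp only [List.filterMap_cons, pvClassify, if_pos hj, if_neg hvi]
      rcases ha : rest.filterMap (fun p => if p.2 = ei then some p.1 else none) with _ | ⟨a0, a'⟩
      · have h0 := ih hrest false
        rw [ha] at h0
        rw [ha]
        simp only [pvClassify] at h0
        cases seen <;> simp [pvMerge, pvFwd, h0]
      · have hk : k < a0 := hA a0 (by rw [ha]; exact List.mem_cons_self)
        have h0 := ih hrest false
        rw [ha] at h0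
        rw [ha]
        have hnk : ¬ (a0 < k) := by omega
        simp only [pvClassify] at h0
        cases seen <;> simp [pvMerge, pvFwd, hnk, h0]
    · by_cases hi : v = ei
      · simp only [List.filterMap_cons, pvClassify, if_pos hi, if_neg hj]
        rcases hb : rest.filterMap (fun p => if p.2 = ej then some p.1 else none) with _ | ⟨b0, b'⟩
        · have h0 := ih hrest true
          rw [hb] at h0
          rw [hb]
          simp only [pvClassify] at h0
          simp [pvMerge, pvFwd, h0]
        · have hk : k < b0 := hB b0 (by rw [hb]; exact List.mem_cons_self)
          have h0 := ih hrest true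
          rw [hb] at h0
          rw [hb]
          simp only [pvClassify] at h0
          simp [pvMerge, pvFwd, hk, h0]
      · simp only [List.filterMap_cons, pvClassify, if_neg hj, if_neg hi]
        exact ih hrest seen

theorem pvOcc_getD (evs : List Int) (s : List Int) (e : Int) (he : e ∈ evs) :
    (pvOcc evs s).getD e [] = pvIdxs e s := by
  suffices h : ∀ (l : List Int) (d : PySem.Dict Int (List Int)),
      (l.foldl (fun d e => d.insert e (pvIdxs e s)) d).getD e [] =
        if e ∈ l then pvIdxs e s else d.getD e [] by
    unfold pvOcc; rw [h]; simp [he]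
  intro l
  induction l with
  | nil => simp
  | cons a t ih =>
    intro d
    simp only [List.foldl_cons, ih, List.mem_cons]
    by_cases hea : e = a
    · by_cases het : e ∈ t <;> simp [hea]
    · by_cases het : e ∈ t <;> simp [hea, het, PySem.Dict.getD_insert]

-- per-pair value equality (distinct events drawn from evs)
theorem pvPair_eq (evs : List Int) (s : List Int) (ei ej : Int)
    (hi : ei ∈ evs) (hj : ej ∈ evs) (hne : ei ≠ ej) :
    pvMerge false ((pvOcc evs s).getD ei []) ((pvOcc evs s).getD ej []) = pvInnerA ei ej s := by
  rw [pvOcc_getD evs s ei hi, pvOcc_getD evs s ej hj, pvInnerA_eq_fwd ei ej hne]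
  unfold pvIdxs
  rw [pvMerge_eq_fwd ei ej hne _ (PySem.List.pairwise_lt_enumerate s 0) false]
  congr 1
  have : s = (PySem.List.enumerate s 0).map (·.2) := (PySem.List.map_snd_enumerate s 0).symm
  conv_rhs => rw [this]
  rw [List.filterMap_map]
  rfl

-- ===== VERDICT (by name: the statement is the Claim_ definition above) =====
theorem alt_precedence_spec : Claim_equal_alt_precedence := by
  intro events sequence _
  unfold Spec_alt_precedence alt_precedence alt_precedence_alt
  apply PySem.List.foldl_congr_mem
  intro acc ei hei
  apply PySem.List.foldl_congr_mem
  intro acc2 ej hej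
  by_cases h : ei = ej
  · simp [h]
  · have := pvPair_eq (PySem.List.sorted events (fun x => x) false) sequence ei ej hei hej h
    simp [h, this]
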